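-- pv_equiv track=rewrite | github.com/10wook/boj | 3408.py | build_prev_next
-- ===== SOURCE A (Python) =====
-- def build_prev_next(arr):
--     n = len(arr)
--     prev = [-1] * n
--     next = [n] * n
--     last_seen = {}
--
--     for i, v in enumerate(arr):
--         if v in last_seen:
--             prev[i] = last_seen[v]
--         last_seen[v] = i
--
--     last_seen.clear()
--
--     for i in range(n-1, -1, -1):
--         v = arr[i]
--         if v in last_seen:
--             next[i] = last_seen[v]
--         last_seen[v] = i
--
--     return prev, next
-- ===== SOURCE B (Python) =====
-- def build_prev_next(arr):
--     n = len(arr)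
--     prev = [next((j for j in range(i - 1, -1, -1) if arr[j] == arr[i]), -1)
--             for i in range(n)]
--     nxt = [next((j for j in range(i + 1, n) if arr[j] == arr[i]), n)
--            for i in range(n)]
--     return prev, nxt
-- ===== Notes on version B (the rewrite author's own statement) =====
-- stated objective: alternative
-- what changed: Replaces the two stateful last_seen-dictionary sweeps with a direct per-element search: for each index, scan left for the nearest previous equal value and right for the nearest next one, with -1/n defaults.
import Mathlib
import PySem

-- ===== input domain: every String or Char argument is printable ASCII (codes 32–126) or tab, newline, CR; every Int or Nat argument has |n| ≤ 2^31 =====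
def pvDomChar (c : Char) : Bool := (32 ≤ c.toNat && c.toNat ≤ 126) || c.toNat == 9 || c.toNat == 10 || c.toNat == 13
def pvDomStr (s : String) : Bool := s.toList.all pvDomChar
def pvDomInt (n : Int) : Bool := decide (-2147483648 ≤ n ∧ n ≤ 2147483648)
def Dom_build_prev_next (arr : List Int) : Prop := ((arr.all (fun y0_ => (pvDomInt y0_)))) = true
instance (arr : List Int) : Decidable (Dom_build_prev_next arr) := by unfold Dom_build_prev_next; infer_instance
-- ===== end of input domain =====

-- B replaces A's two last_seen-dictionary sweeps by a direct per-element scan for the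
-- nearest equal neighbour on each side (a different algorithm, not claimed faster).


-- ===== PORT A =====
-- forward step: 'if v in last_seen: prev[i] = last_seen[v]; last_seen[v] = i'
def fwdStep (st : List Int × PySem.Dict Int Int) (iv : Int × Int) : List Int × PySem.Dict Int Int :=
  let prev := if (st.2).contains iv.2 then (st.1).set iv.1.toNat ((st.2).getD iv.2 0) else st.1
  (prev, (st.2).insert iv.2 iv.1)

-- backward step at index i (i : Nat; the Python loop 'for i in range(n-1, -1, -1)' visits
-- exactly the indices n-1, …, 0, ported as the list (List.range n).reverse — exact):
-- 'v = arr[i]; if v in last_seen: next[i] = last_seen[v]; last_seen[v] = i'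
def bwdStep (arr : List Int) (st : List Int × PySem.Dict Int Int) (i : Nat) : List Int × PySem.Dict Int Int :=
  let v := arr.getD i 0    -- arr[i], i always in range here: exact
  let nxt := if (st.2).contains v then (st.1).set i ((st.2).getD v 0) else st.1
  (nxt, (st.2).insert v (i : Int))

def build_prev_next (arr : List Int) : List Int × List Int :=
  let n := arr.length
  let s1 := (PySem.List.enumerate arr).foldl fwdStep (List.replicate n (-1), PySem.Dict.empty)
  let s2 := ((List.range n).reverse).foldl (bwdStep arr) (List.replicate n (n : Int), PySem.Dict.empty)
  (s1.1, s2.1)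

-- ===== PORT B =====
-- next((j for j in range(i-1,-1,-1) if arr[j]==arr[i]), -1)   (range(i-1,-1,-1) = indices i-1..0)
def prevVal (arr : List Int) (i : Nat) : Int :=
  match ((List.range i).reverse).find? (fun j => arr.getD j 0 == arr.getD i 0) with
  | some j => (j : Int)
  | none => -1

-- next((j for j in range(i+1,n) if arr[j]==arr[i]), n)   (range(i+1,n) = List.range' (i+1) (n-(i+1)))
def nextVal (arr : List Int) (i : Nat) : Int :=
  match (List.range' (i+1) (arr.length - (i+1))).find? (fun j => arr.getD j 0 == arr.getD i 0) with
  | some j => (j : Int)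
  | none => (arr.length : Int)

def build_prev_next_alt (arr : List Int) : List Int × List Int :=
  ((List.range arr.length).map (prevVal arr), (List.range arr.length).map (nextVal arr))

-- ===== PRECONDITION & SPEC =====
def Spec_build_prev_next (arr : List Int) (out : List Int × List Int) : Prop := out = build_prev_next_alt arr
instance (arr : List Int) (out : List Int × List Int) : Decidable (Spec_build_prev_next arr out) := by unfold Spec_build_prev_next; infer_instance

-- ===== CLAIM (what is proved, stated in full; the proofs are below) =====
def Claim_equal_build_prev_next : Prop := ∀ (arr : List Int), Dom_build_prev_next arr → Spec_build_prev_next arr (build_prev_next arr)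

-- ===== LEMMAS AND PROOFS =====

theorem fwd_loop (arr : List Int) :
    ∀ (ys : List Int) (k : Nat) (p : List Int) (d : PySem.Dict Int Int),
      arr.drop k = ys →
      p.length = arr.length →
      (∀ t, t < arr.length → p.getD t 0 = if t < k then prevVal arr t else -1) →
      (∀ v, d.get? v = ((List.range k).reverse.find? (fun j => arr.getD j 0 == v)).map (fun j => (j : Int))) →
      ((PySem.List.enumerate ys (k : Int)).foldl fwdStep (p, d)).1.length = arr.length ∧
      ∀ t, t < arr.length →
        ((PySem.List.enumerate ys (k : Int)).foldl fwdStep (p, d)).1.getD t 0 = prevVal arr t := by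
  intro ys
  induction ys with
  | nil =>
    intro k p d hdrop hlen hpt hd
    have hk : arr.length ≤ k := List.drop_eq_nil_iff.mp hdrop
    simp only [PySem.List.enumerate_nil, List.foldl_nil]
    refine ⟨hlen, fun t ht => ?_⟩
    rw [hpt t ht, if_pos (lt_of_lt_of_le ht hk)]
  | cons y ys' ih =>
    intro k p d hdrop hlen hpt hd
    have hk : k < arr.length := by
      rcases Nat.lt_or_ge k arr.length with h | h
      · exact h
      · simp [List.drop_eq_nil_of_le h] at hdrop
    have hget? : arr[k]? = some y := by
      have h2 : (List.drop k arr)[0]? = arr[k]? := by simp [List.getElem?_drop]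
      rw [hdrop] at h2; simpa using h2.symm
    have hy : arr.getD k 0 = y := by
      rw [List.getD_eq_getElem?_getD, hget?]; rfl
    have hdrop' : arr.drop (k+1) = ys' := by
      have h1 : List.drop 1 (List.drop k arr) = ys' := by rw [hdrop]; rfl
      simpa [List.drop_drop, Nat.add_comm] using h1
    have hcast : ((k : Int) + 1) = ((k+1 : Nat) : Int) := by push_cast; ring
    rw [PySem.List.enumerate_cons, hcast, List.foldl_cons]
    have hset : ∀ (q : List Int), q.length = arr.length →
        fwdStep (q, d) ((k : Int), y) =
          ((if d.contains y then q.set k (d.getD y 0) else q), d.insert y (k : Int)) := by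
      intro q _
      simp [fwdStep]
    rw [hset p hlen]
    set p' : List Int := if d.contains y then p.set k (d.getD y 0) else p with hp'
    have hlen' : p'.length = arr.length := by
      rw [hp']; split <;> simp [hlen]
    refine ih (k+1) p' (d.insert y (k : Int)) hdrop' hlen' ?_ ?_
    · -- array invariant
      intro t ht
      by_cases htk : t = k
      · subst htk
        rw [if_pos (Nat.lt_succ_self t)]
        unfold prevVal
        rw [hy]
        cases hfind : (List.range t).reverse.find? (fun j => arr.getD j 0 == y) with
        | none =>
          have hnone : d.get? y = none := by rw [hd y, hfind]; rfl
          have hcf : d.contains y = false := by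
            rw [PySem.Dict.contains_eq_isSome_get?, hnone]; rfl
          rw [hp', if_neg (by simp [hcf]), hpt t ht, if_neg (lt_irrefl t)]
        | some j =>
          have hsome : d.get? y = some (j : Int) := by rw [hd y, hfind]; rfl
          have hct : d.contains y = true := by
            rw [PySem.Dict.contains_eq_isSome_get?, hsome]; rfl
          have hgetd : d.getD y 0 = (j : Int) := by
            rw [PySem.Dict.getD_eq_get?_getD, hsome]; rfl
          rw [hp', if_pos hct, hgetd]
          simp [List.getD_eq_getElem?_getD, hlen ▸ ht]
      · have hsame : p'.getD t 0 = p.getD t 0 := by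
          rw [hp']; split
          · simp [List.getD_eq_getElem?_getD, List.getElem?_set_ne (Ne.symm htk)]
          · rfl
        rw [hsame, hpt t ht]
        exact if_congr (by omega) rfl rfl
    · -- dict invariant
      intro v
      have hrange : (List.range (k+1)).reverse = k :: (List.range k).reverse := by
        simp [List.range_succ]
      rw [hrange, List.find?_cons, PySem.Dict.get?_insert, hd v]
      by_cases hv : v = y
      · simp [hv, List.getD_eq_getElem?_getD, hget?]
      · have hbf : (y == v) = false := by simp [Ne.symm hv]
        simp [hv, List.getD_eq_getElem?_getD, hget?, hbf]

theorem bwd_loop (arr : List Int) :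
    ∀ (k : Nat) (p : List Int) (d : PySem.Dict Int Int),
      k ≤ arr.length →
      p.length = arr.length →
      (∀ t, t < arr.length → p.getD t 0 = if k ≤ t then nextVal arr t else (arr.length : Int)) →
      (∀ v, d.get? v = ((List.range' k (arr.length - k)).find? (fun j => arr.getD j 0 == v)).map (fun j => (j : Int))) →
      (((List.range k).reverse).foldl (bwdStep arr) (p, d)).1.length = arr.length ∧
      ∀ t, t < arr.length →
        (((List.range k).reverse).foldl (bwdStep arr) (p, d)).1.getD t 0 = nextVal arr t := by
  intro k
  induction k with
  | zero =>
    intro p d _ hlen hpt hd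
    simp only [List.range_zero, List.reverse_nil, List.foldl_nil]
    exact ⟨hlen, fun t ht => by rw [hpt t ht, if_pos (Nat.zero_le t)]⟩
  | succ k ih =>
    intro p d hkle hlen hpt hd
    have hk : k < arr.length := by omega
    have hget? : arr[k]? = some (arr.getD k 0) := by
      rw [List.getElem?_eq_getElem hk, List.getD_eq_getElem arr 0 hk]
    have hrange : (List.range (k+1)).reverse = k :: (List.range k).reverse := by
      simp [List.range_succ]
    rw [hrange, List.foldl_cons]
    have hstep : bwdStep arr (p, d) k =
        ((if d.contains (arr.getD k 0) then p.set k (d.getD (arr.getD k 0) 0) else p),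
          d.insert (arr.getD k 0) (k : Int)) := by
      simp [bwdStep]
    rw [hstep]
    set p' : List Int := if d.contains (arr.getD k 0) then p.set k (d.getD (arr.getD k 0) 0) else p with hp'
    have hlen' : p'.length = arr.length := by
      rw [hp']; split <;> simp [hlen]
    refine ih p' (d.insert (arr.getD k 0) (k : Int)) (by omega) hlen' ?_ ?_
    · -- array invariant
      intro t ht
      by_cases htk : t = k
      · subst htk
        rw [if_pos (Nat.le_refl t)]
        unfold nextVal
        cases hfind : (List.range' (t+1) (arr.length - (t+1))).find? (fun j => arr.getD j 0 == arr.getD t 0) with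
        | none =>
          have hnone : d.get? (arr.getD t 0) = none := by rw [hd _, hfind]; rfl
          have hcf : d.contains (arr.getD t 0) = false := by
            rw [PySem.Dict.contains_eq_isSome_get?, hnone]; rfl
          rw [hp', if_neg (by rw [hcf]; simp), hpt t ht, if_neg (by omega)]
        | some j =>
          have hsome : d.get? (arr.getD t 0) = some (j : Int) := by rw [hd _, hfind]; rfl
          have hct : d.contains (arr.getD t 0) = true := by
            rw [PySem.Dict.contains_eq_isSome_get?, hsome]; rfl
          have hgetd : d.getD (arr.getD t 0) 0 = (j : Int) := by
            rw [PySem.Dict.getD_eq_get?_getD, hsome]; rfl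
          rw [hp', if_pos hct, hgetd]
          simp [List.getD_eq_getElem?_getD, hlen ▸ ht]
      · have hsame : p'.getD t 0 = p.getD t 0 := by
          rw [hp']; split
          · simp [List.getD_eq_getElem?_getD, List.getElem?_set_ne (Ne.symm htk)]
          · rfl
        rw [hsame, hpt t ht]
        exact if_congr (by omega) rfl rfl
    · -- dict invariant
      intro w
      have hsub : arr.length - k = (arr.length - (k+1)) + 1 := by omega
      have hrange' : List.range' k (arr.length - k) = k :: List.range' (k+1) (arr.length - (k+1)) := by
        rw [hsub, List.range'_succ]
      rw [hrange', List.find?_cons, PySem.Dict.get?_insert, hd w]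
      simp only [List.getD_eq_getElem?_getD]
      by_cases hw : w = arr[k]?.getD 0
      · simp [hw]
      · have hbf : (arr[k]?.getD 0 == w) = false := by
          simp only [beq_eq_false_iff_ne, ne_eq]
          exact fun h => hw h.symm
        simp [hw, hbf]

-- ===== VERDICT (by name: the statement is the Claim_ definition above) =====
theorem build_prev_next_spec : Claim_equal_build_prev_next := by
  unfold Claim_equal_build_prev_next
  intro arr _
  unfold Spec_build_prev_next build_prev_next build_prev_next_alt
  have hfwd := fwd_loop arr arr 0 (List.replicate arr.length (-1)) PySem.Dict.empty
    (by simp) (by simp)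
    (fun t ht => by simp [List.getD_eq_getElem?_getD, ht])
    (fun v => by simp [PySem.Dict.get?_empty])
  have hbwd := bwd_loop arr arr.length (List.replicate arr.length (arr.length : Int)) PySem.Dict.empty
    (Nat.le_refl _) (by simp)
    (fun t ht => by simp [List.getD_eq_getElem?_getD, ht])
    (fun v => by simp [PySem.Dict.get?_empty])
  have hzero : ((0 : Nat) : Int) = 0 := rfl
  rw [hzero] at hfwd
  refine Prod.ext ?_ ?_
  · apply List.ext_getElem (by rw [hfwd.1]; simp)
    intro t h1 h2
    have hfin := hfwd.2 t (by rwa [hfwd.1] at h1)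
    rw [List.getD_eq_getElem _ 0 h1] at hfin
    simpa using hfin
  · apply List.ext_getElem (by rw [hbwd.1]; simp)
    intro t h1 h2
    have hfin := hbwd.2 t (by rwa [hbwd.1] at h1)
    rw [List.getD_eq_getElem _ 0 h1] at hfin
    simpa using hfin
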